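-- pv_equiv track=rewrite | github.com/diegonobu/companies_rank | report.py | organize_values
-- ===== SOURCE A (Python) =====
-- def is_fav(answer):
--     return answer == 0 or answer == 1
--
-- def is_unfav(answer):
--     return answer == 3 or answer == 4
--
-- def organize_values(data):
--     result = {}
--     for id, answer in data:
--         if id not in result:
--             result[id] = {'fav': 0, 'neutral': 0, 'unfav': 0, 'total': 0}
--         if is_fav(answer):
--             result[id]['fav'] += 1
--         elif is_unfav(answer):
--             result[id]['unfav'] += 1
--         else:
--             result[id]['neutral'] += 1
--         result[id]['total'] += 1
--     return result
-- ===== SOURCE B (Python) =====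
-- def _summarize(answers):
--     fav = sum(1 for a in answers if a in (0, 1))
--     unfav = sum(1 for a in answers if a in (3, 4))
--     total = len(answers)
--     return {'fav': fav, 'neutral': total - fav - unfav, 'unfav': unfav, 'total': total}
--
-- def organize_values(data):
--     groups = {}
--     for id, answer in data:
--         groups.setdefault(id, []).append(answer)
--     return {id: _summarize(answers) for id, answers in groups.items()}
-- ===== Notes on version B (the rewrite author's own statement) =====
-- stated objective: alternative
-- what changed: B replaces A's interleaved classify-and-increment single pass over nested counter dicts by a two-phase shape: one pass grouping answers per id into lists, then a per-id summary computed from counts, with neutral derived as total - fav - unfav.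
import Mathlib
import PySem

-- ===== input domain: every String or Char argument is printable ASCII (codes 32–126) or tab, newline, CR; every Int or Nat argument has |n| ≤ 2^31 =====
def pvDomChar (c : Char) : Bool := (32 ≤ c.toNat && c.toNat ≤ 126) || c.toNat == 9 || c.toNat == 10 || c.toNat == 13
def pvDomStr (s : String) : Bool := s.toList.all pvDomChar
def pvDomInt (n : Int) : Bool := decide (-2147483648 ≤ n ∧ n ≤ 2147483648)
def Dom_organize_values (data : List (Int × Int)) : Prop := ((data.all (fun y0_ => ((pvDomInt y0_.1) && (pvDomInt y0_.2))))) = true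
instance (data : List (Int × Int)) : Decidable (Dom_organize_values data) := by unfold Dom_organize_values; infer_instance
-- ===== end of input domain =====

-- B groups answers per id first (setdefault loop), then summarizes each group with counts; same result as A's interleaved single pass (alternative decomposition, no speed claim).


-- ===== PORT A =====
def is_fav (answer : Int) : Bool := answer == 0 || answer == 1

def is_unfav (answer : Int) : Bool := answer == 3 || answer == 4

def organize_values (data : List (Int × Int)) : List (Int × List (String × Int)) :=
  let result : PySem.Dict Int (PySem.Dict String Int) :=
    data.foldl (fun result p =>
      let result := if result.contains p.1 then result
        else result.insert p.1 (PySem.Dict.ofList [("fav", (0 : Int)), ("neutral", 0), ("unfav", 0), ("total", 0)])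
      let result := if is_fav p.2 then
          result.modify p.1 PySem.Dict.empty (fun inner => inner.modify "fav" 0 (· + 1))
        else if is_unfav p.2 then
          result.modify p.1 PySem.Dict.empty (fun inner => inner.modify "unfav" 0 (· + 1))
        else
          result.modify p.1 PySem.Dict.empty (fun inner => inner.modify "neutral" 0 (· + 1))
      result.modify p.1 PySem.Dict.empty (fun inner => inner.modify "total" 0 (· + 1)))
      PySem.Dict.empty
  result.items.map (fun p => (p.1, p.2.items))

-- ===== PORT B =====
-- sum(1 for a in answers if a in S) is ported as the length of the filtered list
def pvSummarize (answers : List Int) : List (String × Int) :=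
  let fav : Int := ((answers.filter (fun a => a == 0 || a == 1)).length : Int)
  let unfav : Int := ((answers.filter (fun a => a == 3 || a == 4)).length : Int)
  let total : Int := (answers.length : Int)
  [("fav", fav), ("neutral", total - fav - unfav), ("unfav", unfav), ("total", total)]

def organize_values_alt (data : List (Int × Int)) : List (Int × List (String × Int)) :=
  let groups : PySem.Dict Int (List Int) :=
    data.foldl (fun groups p => groups.modify p.1 [] (· ++ [p.2])) PySem.Dict.empty
  -- dict comprehension over groups.items (keys distinct) = map
  groups.items.map (fun p => (p.1, pvSummarize p.2))

-- ===== PRECONDITION & SPEC =====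
def Spec_organize_values (data : List (Int × Int)) (out : List (Int × List (String × Int))) : Prop := out = organize_values_alt data
instance (data : List (Int × Int)) (out : List (Int × List (String × Int))) : Decidable (Spec_organize_values data out) := by unfold Spec_organize_values; infer_instance

-- ===== CLAIM (what is proved, stated in full; the proofs are below) =====
def Claim_equal_organize_values : Prop := ∀ (data : List (Int × Int)), Dom_organize_values data → Spec_organize_values data (organize_values data)

-- ===== LEMMAS AND PROOFS =====

-- the summary dict of a list of answers, as a Dict (A's per-id state)
def sumD (xs : List Int) : PySem.Dict String Int :=
  PySem.Dict.mk [("fav", ((xs.filter (fun a => a == 0 || a == 1)).length : Int)),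
                 ("neutral", (xs.length : Int) - ((xs.filter (fun a => a == 0 || a == 1)).length : Int)
                               - ((xs.filter (fun a => a == 3 || a == 4)).length : Int)),
                 ("unfav", ((xs.filter (fun a => a == 3 || a == 4)).length : Int)),
                 ("total", (xs.length : Int))]

-- A's loop body increments one category and the total
def bump (a : Int) (inner : PySem.Dict String Int) : PySem.Dict String Int :=
  (if is_fav a then inner.modify "fav" 0 (· + 1)
   else if is_unfav a then inner.modify "unfav" 0 (· + 1)
   else inner.modify "neutral" 0 (· + 1)).modify "total" 0 (· + 1)

lemma sumD_items (xs : List Int) : (sumD xs).items = pvSummarize xs := rfl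

lemma getD_congr_of_contains {κ ν : Type} [BEq κ] [LawfulBEq κ]
    (d : PySem.Dict κ ν) (k : κ) (h : d.contains k = true) (d0 d1 : ν) :
    d.getD k d0 = d.getD k d1 := by
  rw [PySem.Dict.contains_eq_isSome_get?] at h
  rcases Option.isSome_iff_exists.mp h with ⟨v, hv⟩
  simp [PySem.Dict.getD_eq_get?_getD, hv]

lemma modify_modify {κ ν : Type} [BEq κ] [LawfulBEq κ]
    (d : PySem.Dict κ ν) (k : κ) (d0 : ν) (f g : ν → ν) :
    (d.modify k d0 f).modify k d0 g = d.insert k (g (f (d.getD k d0))) := by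
  rw [show ∀ (e : PySem.Dict κ ν), e.modify k d0 g = e.insert k (g (e.getD k d0)) from fun _ => rfl]
  rw [show d.modify k d0 f = d.insert k (f (d.getD k d0)) from rfl]
  rw [PySem.Dict.getD_insert_self, PySem.Dict.insert_insert_self]

lemma stepA_eq (d : PySem.Dict Int (PySem.Dict String Int)) (p : Int × Int) :
    (let result := if d.contains p.1 then d
        else d.insert p.1 (PySem.Dict.ofList [("fav", (0 : Int)), ("neutral", 0), ("unfav", 0), ("total", 0)])
     let result := if is_fav p.2 then
         result.modify p.1 PySem.Dict.empty (fun inner => inner.modify "fav" 0 (· + 1))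
       else if is_unfav p.2 then
         result.modify p.1 PySem.Dict.empty (fun inner => inner.modify "unfav" 0 (· + 1))
       else
         result.modify p.1 PySem.Dict.empty (fun inner => inner.modify "neutral" 0 (· + 1))
     result.modify p.1 PySem.Dict.empty (fun inner => inner.modify "total" 0 (· + 1)))
    = d.insert p.1 (bump p.2 (d.getD p.1 (sumD []))) := by
  have hof : (PySem.Dict.ofList [("fav", (0 : Int)), ("neutral", 0), ("unfav", 0), ("total", 0)])
      = sumD [] := by decide
  by_cases hc : d.contains p.1 = true
  · have h0 := getD_congr_of_contains d p.1 hc PySem.Dict.empty (sumD [])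
    by_cases hf : is_fav p.2 = true
    · simp [hc, hf, bump, modify_modify, h0]
    · by_cases hu : is_unfav p.2 = true
      · simp [hc, hf, hu, bump, modify_modify, h0]
      · simp [hc, hf, hu, bump, modify_modify, h0]
  · have hc' : d.contains p.1 = false := by simpa using hc
    have h1 : d.getD p.1 (sumD []) = sumD [] := PySem.Dict.getD_of_not_contains _ _ hc'
    by_cases hf : is_fav p.2 = true
    · simp [hc', hof, hf, bump, modify_modify,
        PySem.Dict.getD_insert_self, PySem.Dict.insert_insert_self, h1]
    · by_cases hu : is_unfav p.2 = true
      · simp [hc', hof, hf, hu, bump, modify_modify,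
          PySem.Dict.getD_insert_self, PySem.Dict.insert_insert_self, h1]
      · simp [hc', hof, hf, hu, bump, modify_modify,
          PySem.Dict.getD_insert_self, PySem.Dict.insert_insert_self, h1]

lemma bump_sumD (a : Int) (xs : List Int) : bump a (sumD xs) = sumD (xs ++ [a]) := by
  by_cases hf : is_fav a = true
  · have hf' : (a == 0 || a == 1) = true := hf
    apply PySem.Dict.ext
    simp [bump, sumD, hf, hf', PySem.Dict.modify, PySem.Dict.insert, PySem.Dict.getD,
      PySem.Dict.get?, PySem.Dict.contains, List.filter_append]
    have hor : a = 0 ∨ a = 1 := by simpa [is_fav] using hf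
    rcases hor with h | h <;> simp [h]
  · by_cases hu : is_unfav a = true
    · have hu' : (a == 3 || a == 4) = true := hu
      have hf' : (a == 0 || a == 1) = false := by simpa [is_fav] using hf
      apply PySem.Dict.ext
      simp [bump, sumD, hf, hu, hf', hu', PySem.Dict.modify, PySem.Dict.insert, PySem.Dict.getD,
        PySem.Dict.get?, PySem.Dict.contains, List.filter_append]
      omega
    · have hu' : (a == 3 || a == 4) = false := by simpa [is_unfav] using hu
      have hf' : (a == 0 || a == 1) = false := by simpa [is_fav] using hf
      apply PySem.Dict.ext
      simp [bump, sumD, hf, hu, hf', hu', PySem.Dict.modify, PySem.Dict.insert, PySem.Dict.getD,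
        PySem.Dict.get?, PySem.Dict.contains, List.filter_append]
      omega

-- invariant: pointwise, A's dict is the summary of B's grouping dict, and the key lists coincide
lemma main_inv (data : List (Int × Int)) :
    ∀ (d : PySem.Dict Int (PySem.Dict String Int)) (g : PySem.Dict Int (List Int)),
    d.keys = g.keys →
    (∀ id, d.getD id (sumD []) = sumD (g.getD id [])) →
    (data.foldl (fun d p => d.insert p.1 (bump p.2 (d.getD p.1 (sumD [])))) d).keys
      = (data.foldl (fun g p => g.modify p.1 [] (· ++ [p.2])) g).keys ∧
    ∀ id, (data.foldl (fun d p => d.insert p.1 (bump p.2 (d.getD p.1 (sumD [])))) d).getD id (sumD [])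
      = sumD ((data.foldl (fun g p => g.modify p.1 [] (· ++ [p.2])) g).getD id []) := by
  induction data with
  | nil => intro d g h1 h2; exact ⟨h1, h2⟩
  | cons p rest ih =>
    intro d g h1 h2
    simp only [List.foldl_cons]
    have hmod : g.modify p.1 [] (· ++ [p.2]) = g.insert p.1 (g.getD p.1 [] ++ [p.2]) := rfl
    rw [hmod]
    have hcg : d.contains p.1 = g.contains p.1 := by
      by_cases h : p.1 ∈ d.keys
      · rw [(PySem.Dict.contains_iff_mem_keys _ _).mpr h,
          (PySem.Dict.contains_iff_mem_keys _ _).mpr (h1 ▸ h)]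
      · have h' : p.1 ∉ g.keys := h1 ▸ h
        rw [show d.contains p.1 = false from by
            simpa using (fun hh => h ((PySem.Dict.contains_iff_mem_keys _ _).mp hh)),
          show g.contains p.1 = false from by
            simpa using (fun hh => h' ((PySem.Dict.contains_iff_mem_keys _ _).mp hh))]
    apply ih
    · by_cases hc : d.contains p.1 = true
      · rw [PySem.Dict.keys_insert_of_contains _ _ hc,
          PySem.Dict.keys_insert_of_contains _ _ (hcg ▸ hc), h1]
      · have hc' : d.contains p.1 = false := by simpa using hc
        rw [PySem.Dict.keys_insert_of_not_contains _ _ hc',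
          PySem.Dict.keys_insert_of_not_contains _ _ (hcg ▸ hc'), h1]
    · intro i
      by_cases hid : i = p.1
      · subst hid
        simp only [PySem.Dict.getD_insert_self]
        rw [h2 p.1, bump_sumD]
      · rw [PySem.Dict.getD_insert_of_ne _ _ _ hid, PySem.Dict.getD_insert_of_ne _ _ _ hid, h2 i]

-- ===== VERDICT (by name: the statement is the Claim_ definition above) =====
theorem organize_values_spec : Claim_equal_organize_values := by
  intro data _hd
  show organize_values data = organize_values_alt data
  simp only [organize_values, organize_values_alt]
  have hfold : (data.foldl (fun result p =>
      let result := if result.contains p.1 then result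
        else result.insert p.1 (PySem.Dict.ofList [("fav", (0 : Int)), ("neutral", 0), ("unfav", 0), ("total", 0)])
      let result := if is_fav p.2 then
          result.modify p.1 PySem.Dict.empty (fun inner => inner.modify "fav" 0 (· + 1))
        else if is_unfav p.2 then
          result.modify p.1 PySem.Dict.empty (fun inner => inner.modify "unfav" 0 (· + 1))
        else
          result.modify p.1 PySem.Dict.empty (fun inner => inner.modify "neutral" 0 (· + 1))
      result.modify p.1 PySem.Dict.empty (fun inner => inner.modify "total" 0 (· + 1)))
      PySem.Dict.empty)
      = data.foldl (fun d p => d.insert p.1 (bump p.2 (d.getD p.1 (sumD [])))) PySem.Dict.empty := by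
    apply List.foldl_ext
    intro d p _
    exact stepA_eq d p
  rw [hfold]
  obtain ⟨hk, hg⟩ := main_inv data PySem.Dict.empty PySem.Dict.empty rfl
    (fun id => by simp [PySem.Dict.getD_empty])
  have ndA : (data.foldl (fun d p => d.insert p.1 (bump p.2 (d.getD p.1 (sumD [])))) PySem.Dict.empty).keys.Nodup :=
    PySem.Dict.nodup_keys_foldl_insert_key _ _ _ _ PySem.Dict.nodup_keys_empty
  have ndG : (data.foldl (fun g p => g.modify p.1 [] (· ++ [p.2])) PySem.Dict.empty).keys.Nodup :=
    PySem.Dict.nodup_keys_foldl_modify_key _ _ _ _ _ PySem.Dict.nodup_keys_empty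
  rw [PySem.Dict.items_eq_map_keys _ ndA (sumD []), PySem.Dict.items_eq_map_keys _ ndG []]
  simp only [List.map_map, Function.comp_def, hk, hg, sumD_items]
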